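-- pv_equiv track=rewrite | github.com/evolutek/services | python/evolutek/lib/objectives.py | find_closest
-- ===== SOURCE A (Python) =====
-- infinite = 100000
--
-- def find_closest(shortest_paths, every_nodes):
--   minimum = infinite
--   res = -1
--   for i in range(len(every_nodes)):
--     node_name = every_nodes[i][0]
--     if shortest_paths[node_name] < minimum :
--       minimum = shortest_paths[node_name]
--       res = i
--   return res
-- ===== SOURCE B (Python) =====
-- infinite = 100000
--
-- def find_closest(shortest_paths, every_nodes):
--   order = sorted((shortest_paths[node[0]], i) for i, node in enumerate(every_nodes))
--   if order and order[0][0] < infinite: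
--     return order[0][1]
--   return -1
-- ===== Notes on version B (the rewrite author's own statement) =====
-- stated objective: alternative
-- what changed: Instead of a running-minimum scan, B builds the full list of (cost, index) pairs, sorts it lexicographically (stable tuple order makes the head the lowest cost with the smallest index, i.e. the first minimum), and returns the head's index if its cost beats the threshold, else -1.
import Mathlib
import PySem

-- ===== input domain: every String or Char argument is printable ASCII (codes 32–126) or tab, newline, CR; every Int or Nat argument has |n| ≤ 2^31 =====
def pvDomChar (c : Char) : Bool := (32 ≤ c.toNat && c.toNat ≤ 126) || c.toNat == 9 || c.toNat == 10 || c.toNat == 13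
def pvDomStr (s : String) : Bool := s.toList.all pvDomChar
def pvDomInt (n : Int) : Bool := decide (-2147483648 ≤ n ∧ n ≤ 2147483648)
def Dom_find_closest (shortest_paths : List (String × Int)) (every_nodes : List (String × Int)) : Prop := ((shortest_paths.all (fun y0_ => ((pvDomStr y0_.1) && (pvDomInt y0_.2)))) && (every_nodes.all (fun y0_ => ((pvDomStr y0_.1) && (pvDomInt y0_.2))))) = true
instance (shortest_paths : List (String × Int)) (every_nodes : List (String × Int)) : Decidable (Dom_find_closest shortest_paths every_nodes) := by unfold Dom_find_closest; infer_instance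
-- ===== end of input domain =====

-- B replaces A's running-minimum scan by sorting all (cost, index) pairs lexicographically and inspecting the head; alternative decomposition, O(n log n).


-- ===== PORT A =====
-- literal port of A: loop over indices with running (minimum, res) state;
-- dict lookup shortest_paths[node_name] is Dict.getD (default unreachable under Pre_)
def find_closest (shortest_paths : List (String × Int)) (every_nodes : List (String × Int)) : Int :=
  let d := PySem.Dict.ofList shortest_paths
  ((PySem.List.pyRange 0 (every_nodes.length : Int) 1).foldl
    (fun (st : Int × Int) i =>
      let node_name := (PySem.List.pyGetD every_nodes i ("", 0)).1
      if d.getD node_name 0 < st.1 then (d.getD node_name 0, i) else st)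
    (100000, -1)).2

-- ===== PORT B =====
-- literal port of B: all (cost, index) pairs, Python tuple sort (sorted2 = lexicographic, stable),
-- then the head's index if its cost < infinite, else -1
def find_closest_alt (shortest_paths : List (String × Int)) (every_nodes : List (String × Int)) : Int :=
  let d := PySem.Dict.ofList shortest_paths
  let order := PySem.List.sorted2
    ((PySem.List.enumerate every_nodes).map (fun p => (d.getD p.2.1 0, p.1)))
    (fun c => c.1) (fun c => c.2)
  match order with
  | [] => -1
  | c :: _ => if c.1 < 100000 then c.2 else -1

-- ===== PRECONDITION & SPEC =====
-- Pre_ excludes exactly the inputs where Python raises KeyError: some node name of every_nodes absent from shortest_paths (both A and B raise there)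
def Pre_find_closest (shortest_paths : List (String × Int)) (every_nodes : List (String × Int)) : Prop :=
  ∀ p ∈ every_nodes, (PySem.Dict.ofList shortest_paths).contains p.1 = true
instance (shortest_paths : List (String × Int)) (every_nodes : List (String × Int)) : Decidable (Pre_find_closest shortest_paths every_nodes) := by unfold Pre_find_closest; infer_instance
def pvWitness_find_closest : (List (String × Int)) × (List (String × Int)) := ([("a", 3), ("b", 100000)], [("b", 0), ("a", 1)])

def Spec_find_closest (shortest_paths : List (String × Int)) (every_nodes : List (String × Int)) (out : Int) : Prop := out = find_closest_alt shortest_paths every_nodes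
instance (shortest_paths : List (String × Int)) (every_nodes : List (String × Int)) (out : Int) : Decidable (Spec_find_closest shortest_paths every_nodes out) := by unfold Spec_find_closest; infer_instance

-- ===== CLAIM (what is proved, stated in full; the proofs are below) =====
def Claim_equal_find_closest : Prop := ∀ (shortest_paths : List (String × Int)) (every_nodes : List (String × Int)), Dom_find_closest shortest_paths every_nodes → Pre_find_closest shortest_paths every_nodes → Spec_find_closest shortest_paths every_nodes (find_closest shortest_paths every_nodes)

-- ===== LEMMAS AND PROOFS =====

-- Python's tuple '<' on (Int, Int), exactly the comparison sorted2 uses with k1 = fst, k2 = snd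
def pvLtb (a b : Int × Int) : Bool :=
  decide (a.1 < b.1) || !decide (b.1 < a.1) && decide (a.2 < b.2)

-- running lexicographic minimum (first minimum wins)
def pvLmin (m x : Int × Int) : Int × Int := if pvLtb x m then x else m

-- A's loop step over an enumerated pair
def pvStepA (d : PySem.Dict String Int) (st : Int × Int) (p : Int × (String × Int)) : Int × Int :=
  if d.getD p.2.1 0 < st.1 then (d.getD p.2.1 0, p.1) else st

-- the (cost, index) pairs B sorts
def pvPairs (d : PySem.Dict String Int) (l : List (Int × (String × Int))) : List (Int × Int) :=
  l.map (fun p => (d.getD p.2.1 0, p.1))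

-- absorbing the seed (100000, -1) commutes with pvLmin on nonnegative-index pairs
theorem pv_comm (x y : Int × Int) (hx : 0 ≤ x.2) (hy : 0 ≤ y.2) :
    pvLmin (pvLmin (100000, -1) x) y = pvLmin (100000, -1) (pvLmin x y) := by
  obtain ⟨x1, x2⟩ := x; obtain ⟨y1, y2⟩ := y
  simp only [pvLmin, pvLtb] at *
  split_ifs <;> simp_all <;> omega

theorem pv_lmin_nonneg (x y : Int × Int) (hx : 0 ≤ x.2) (hy : 0 ≤ y.2) :
    0 ≤ (pvLmin x y).2 := by
  simp only [pvLmin]; split_ifs <;> assumption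

theorem pv_foldl_nonneg (xs : List (Int × Int)) : ∀ (a : Int × Int), (∀ y ∈ xs, 0 ≤ y.2) → 0 ≤ a.2 →
    0 ≤ (xs.foldl pvLmin a).2 := by
  induction xs with
  | nil => intro a _ ha; exact ha
  | cons y ys ih =>
    intro a hxs ha
    rw [List.foldl_cons]
    exact ih (pvLmin a y) (fun z hz => hxs z (by simp [hz])) (pv_lmin_nonneg a y ha (hxs y (by simp)))

-- folding from the seeded state = seeding the folded state
theorem pv_G (xs : List (Int × Int)) : ∀ (x : Int × Int), (∀ y ∈ xs, 0 ≤ y.2) → 0 ≤ x.2 →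
    xs.foldl pvLmin (pvLmin (100000, -1) x) = pvLmin (100000, -1) (xs.foldl pvLmin x) := by
  induction xs with
  | nil => intro x _ _; rfl
  | cons y ys ih =>
    intro x hxs hx
    have hy : 0 ≤ y.2 := hxs y (by simp)
    rw [List.foldl_cons, List.foldl_cons, pv_comm x y hx hy]
    exact ih (pvLmin x y) (fun z hz => hxs z (by simp [hz])) (pv_lmin_nonneg x y hx hy)

-- B's running lex-min over the pairs tracks A's loop (indices strictly increase, so ties never fire)
theorem pv_core (d : PySem.Dict String Int) :
    ∀ (l : List (Int × (String × Int))) (st : Int × Int),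
      (∀ p ∈ l, st.2 < p.1) → l.Pairwise (fun p q => p.1 < q.1) →
      (pvPairs d l).foldl pvLmin st = l.foldl (pvStepA d) st := by
  intro l
  induction l with
  | nil => intro st _ _; rfl
  | cons p rest ih =>
    intro st hidx hpw
    have hpw' := List.pairwise_cons.mp hpw
    have hp : st.2 < p.1 := hidx p (by simp)
    have hstep : pvLmin st (d.getD p.2.1 0, p.1) = pvStepA d st p := by
      simp only [pvLmin, pvLtb, pvStepA]
      by_cases h1 : d.getD p.2.1 0 < st.1
      · simp [h1]
      · have h2 : ¬ p.1 < st.2 := not_lt.mpr (le_of_lt hp)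
        simp [h1, h2]
    simp only [pvPairs, List.map_cons, List.foldl_cons] at *
    rw [hstep]
    apply ih
    · intro q hq
      simp only [pvStepA]
      split_ifs
      · exact hpw'.1 q hq
      · exact hidx q (by simp [hq])
    · exact hpw'.2

-- head of the insertBy fold is the running lex-min
theorem pv_head (xs : List (Int × Int)) : ∀ (a : Int × Int) (rest : List (Int × Int)),
    ∃ t, xs.foldl (fun acc x => PySem.List.insertBy pvLtb x acc) (a :: rest)
      = (xs.foldl pvLmin a) :: t := by
  induction xs with
  | nil => intro a rest; exact ⟨rest, rfl⟩
  | cons x xs ih =>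
    intro a rest
    rw [List.foldl_cons, List.foldl_cons]
    by_cases h : pvLtb x a = true
    · have : PySem.List.insertBy pvLtb x (a :: rest) = x :: a :: rest := by
        simp [PySem.List.insertBy, h]
      rw [this, show pvLmin a x = x by simp [pvLmin, h]]
      exact ih x (a :: rest)
    · have : PySem.List.insertBy pvLtb x (a :: rest) = a :: PySem.List.insertBy pvLtb x rest := by
        simp [PySem.List.insertBy, h]
      rw [this, show pvLmin a x = a by simp [pvLmin, h]]
      exact ih a _

-- sorted2 on a nonempty list starts with the running lex-min
theorem pv_sorted2_head (c : Int × Int) (cs : List (Int × Int)) :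
    ∃ t, PySem.List.sorted2 (c :: cs) (fun c => c.1) (fun c => c.2) false
      = (cs.foldl pvLmin c) :: t := by
  show ∃ t, cs.foldl (fun acc x => PySem.List.insertBy pvLtb x acc) [c] = _ :: t
  exact pv_head cs c []

theorem pv_main (shortest_paths every_nodes : List (String × Int)) :
    find_closest shortest_paths every_nodes = find_closest_alt shortest_paths every_nodes := by
  set d := PySem.Dict.ofList shortest_paths with hd
  show ((PySem.List.pyRange 0 (every_nodes.length : Int) 1).foldl
      (fun (st : Int × Int) i =>
        if d.getD (PySem.List.pyGetD every_nodes i ("", 0)).1 0 < st.1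
        then (d.getD (PySem.List.pyGetD every_nodes i ("", 0)).1 0, i) else st)
      (100000, -1)).2
    = match PySem.List.sorted2 (pvPairs d (PySem.List.enumerate every_nodes))
        (fun c => c.1) (fun c => c.2) false with
      | [] => -1
      | c :: _ => if c.1 < 100000 then c.2 else -1
  -- rewrite A's index loop as a loop over the enumerated list
  rw [show (PySem.List.pyRange 0 (every_nodes.length : Int) 1).foldl
        (fun (st : Int × Int) i =>
          if d.getD (PySem.List.pyGetD every_nodes i ("", 0)).1 0 < st.1
          then (d.getD (PySem.List.pyGetD every_nodes i ("", 0)).1 0, i) else st)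
        (100000, -1)
      = (PySem.List.enumerate every_nodes).foldl (pvStepA d) (100000, -1) by
    rw [PySem.List.enumerate_eq_map_pyRange every_nodes ("", 0), PySem.List.len_eq, List.foldl_map]
    rfl]
  have hidx : ∀ p ∈ PySem.List.enumerate every_nodes, (-1 : Int) < p.1 := by
    intro p hp
    rcases (PySem.List.mem_enumerate_iff _ _ _).mp hp with ⟨k, hk, rfl⟩
    simp; omega
  rw [← pv_core d (PySem.List.enumerate every_nodes) (100000, -1) hidx
      (PySem.List.pairwise_lt_enumerate every_nodes 0)]
  cases hen : every_nodes with
  | nil => rfl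
  | cons e rest =>
    rw [PySem.List.enumerate_cons]
    simp only [zero_add]
    have hnn : ∀ y ∈ pvPairs d (PySem.List.enumerate rest 1), 0 ≤ y.2 := by
      intro y hy
      simp only [pvPairs, List.mem_map] at hy
      obtain ⟨p, hp, rfl⟩ := hy
      rcases (PySem.List.mem_enumerate_iff _ _ _).mp hp with ⟨k, hk, rfl⟩
      simp; omega
    obtain ⟨t, ht⟩ := pv_sorted2_head (d.getD e.1 0, 0) (pvPairs d (PySem.List.enumerate rest 1))
    have hps : pvPairs d ((0, e) :: PySem.List.enumerate rest 1)
        = (d.getD e.1 0, 0) :: pvPairs d (PySem.List.enumerate rest 1) := rfl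
    rw [hps, ht, List.foldl_cons,
        pv_G (pvPairs d (PySem.List.enumerate rest 1)) (d.getD e.1 0, 0) hnn (by simp)]
    have hh : 0 ≤ ((pvPairs d (PySem.List.enumerate rest 1)).foldl pvLmin (d.getD e.1 0, 0)).2 :=
      pv_foldl_nonneg _ _ hnn (by simp)
    set h := (pvPairs d (PySem.List.enumerate rest 1)).foldl pvLmin (d.getD e.1 0, 0) with hhdef
    obtain ⟨h1, h2⟩ := h
    simp only [pvLmin, pvLtb] at *
    split_ifs <;> simp_all
    omega

-- ===== VERDICT (by name: the statement is the Claim_ definition above) =====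
theorem find_closest_spec : Claim_equal_find_closest := by
  intro sp en _ _
  unfold Spec_find_closest
  exact pv_main sp en
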